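-- pv_equiv track=rewrite | github.com/tonnyhjw/czsc | src/concept/utils.py | merge_concept_stocks
-- ===== SOURCE A (Python) =====
-- def merge_concept_stocks(stock_list):
--     """
--     合并相同股票买点但不同概念名的股票信息
--
--     Args:
--         stock_list: List[dict] 包含股票买点和概念信息的字典列表
--
--     Returns:
--         List[dict] 合并后的字典列表，相同股票的概念名会被合并到name字段中
--     """
--     # 用于存储合并结果的字典
--     merged = {}
--
--     # 遍历所有股票信息
--     for stock in stock_list:
--         ts_code = stock['ts_code']
--
--         # 如果股票代码已存在，则合并概念名
--         if ts_code in merged: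
--             # 确保不重复添加相同的概念名
--             if stock['name'] not in merged[ts_code]['name']:
--                 merged[ts_code]['name'] = merged[ts_code]['name'] + ',' + stock['name']
--         # 如果是新的股票代码，直接添加
--         else:
--             merged[ts_code] = stock.copy()
--
--     # 将字典转换回列表
--     return list(merged.values())
-- ===== SOURCE B (Python) =====
-- def merge_concept_stocks(stock_list):
--     """
--     Two-pass variant: first group the stocks by ts_code in first-occurrence
--     order, then reduce each group by folding concept names into a copy of
--     the group's first record.
--     """
--     groups = {}
--     for stock in stock_list:
--         groups.setdefault(stock['ts_code'], []).append(stock)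
--
--     result = []
--     for group in groups.values():
--         base = group[0].copy()
--         for stock in group[1:]:
--             name = stock['name']
--             if name not in base['name']:
--                 base['name'] = base['name'] + ',' + name
--         result.append(base)
--     return result
-- ===== Notes on version B (the rewrite author's own statement) =====
-- stated objective: alternative
-- what changed: Replaces A's single-pass accumulate-into-a-dict with a build-index-then-reduce shape: one pass groups stocks by ts_code in first-occurrence order, a second pass folds each group's names into a copy of its first record.
import Mathlib
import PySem

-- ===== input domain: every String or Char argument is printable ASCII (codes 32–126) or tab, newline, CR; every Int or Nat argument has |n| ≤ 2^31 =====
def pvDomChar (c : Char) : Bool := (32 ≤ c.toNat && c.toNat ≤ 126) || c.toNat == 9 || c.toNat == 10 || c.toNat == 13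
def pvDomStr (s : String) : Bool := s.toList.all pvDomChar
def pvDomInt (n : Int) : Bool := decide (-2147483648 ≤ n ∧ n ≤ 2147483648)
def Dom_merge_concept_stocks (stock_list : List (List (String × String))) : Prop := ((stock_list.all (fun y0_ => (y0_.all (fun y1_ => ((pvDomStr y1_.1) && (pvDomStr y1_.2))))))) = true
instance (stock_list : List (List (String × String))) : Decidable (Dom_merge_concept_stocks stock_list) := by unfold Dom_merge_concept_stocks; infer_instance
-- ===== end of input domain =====

-- B replaces A's one-pass accumulate-into-a-dict with a two-pass build-groups-then-reduce decomposition (objective: alternative; same cost).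

-- ===== PORT A =====
-- A's loop body: merge one stock into the accumulator dict (ts_code → merged record).
def mcsStepA (merged : PySem.Dict String (PySem.Dict String String))
    (stock : List (String × String)) : PySem.Dict String (PySem.Dict String String) :=
  let st : PySem.Dict String String := PySem.Dict.mk stock
  let ts_code := st.getD "ts_code" ""
  match merged.get? ts_code with
  | some found =>
      if PySem.Str.isIn (st.getD "name" "") (found.getD "name" "") then merged
      else merged.insert ts_code
        (found.insert "name" (found.getD "name" "" ++ "," ++ st.getD "name" ""))
  | none => merged.insert ts_code st

def merge_concept_stocks (stock_list : List (List (String × String))) : List (List (String × String)) :=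
  ((stock_list.foldl mcsStepA (PySem.Dict.mk [])).values).map (fun r => r.items)

-- ===== PORT B =====
-- B's inner reduce step: fold one further stock's name into the base record.
def mcsNameStep (base st : PySem.Dict String String) : PySem.Dict String String :=
  let name := st.getD "name" ""
  if PySem.Str.isIn name (base.getD "name" "") then base
  else base.insert "name" (base.getD "name" "" ++ "," ++ name)

def mcsReduce (group : List (PySem.Dict String String)) : PySem.Dict String String :=
  match group with
  | [] => PySem.Dict.mk []  -- unreachable: groups built by mcsGroupStep are never empty
  | base :: rest => rest.foldl mcsNameStep base

-- B's first pass: group the stocks by ts_code in first-occurrence order.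
def mcsGroupStep (groups : PySem.Dict String (List (PySem.Dict String String)))
    (stock : List (String × String)) : PySem.Dict String (List (PySem.Dict String String)) :=
  let st : PySem.Dict String String := PySem.Dict.mk stock
  groups.modify (st.getD "ts_code" "") [] (fun grp => grp ++ [st])

def merge_concept_stocks_alt (stock_list : List (List (String × String))) : List (List (String × String)) :=
  ((stock_list.foldl mcsGroupStep (PySem.Dict.mk [])).values).map (fun grp => (mcsReduce grp).items)

-- ===== PRECONDITION & SPEC =====
-- Pre_ admits exactly the inputs where Python A returns: every stock dict must carry the
-- 'ts_code' key, and a stock whose ts_code occurs more than once must also carry the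
-- 'name' key A merges; on any other input A raises KeyError.
def Pre_merge_concept_stocks (stock_list : List (List (String × String))) : Prop :=
  ∀ stock ∈ stock_list, "ts_code" ∈ stock.map Prod.fst ∧
    (1 < stock_list.countP (fun s =>
        (PySem.Dict.mk s).getD "ts_code" "" == (PySem.Dict.mk stock).getD "ts_code" "") →
      "name" ∈ stock.map Prod.fst)
instance (stock_list : List (List (String × String))) : Decidable (Pre_merge_concept_stocks stock_list) := by unfold Pre_merge_concept_stocks; infer_instance

def pvWitness_merge_concept_stocks : (List (List (String × String))) :=
  [[("ts_code", "000001.SZ"), ("name", "AI")], [("ts_code", "000001.SZ"), ("name", "chips")]]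

def Spec_merge_concept_stocks (stock_list : List (List (String × String))) (out : List (List (String × String))) : Prop := out = merge_concept_stocks_alt stock_list
instance (stock_list : List (List (String × String))) (out : List (List (String × String))) : Decidable (Spec_merge_concept_stocks stock_list out) := by unfold Spec_merge_concept_stocks; infer_instance

-- ===== CLAIM (what is proved, stated in full; the proofs are below) =====
def Claim_equal_merge_concept_stocks : Prop := ∀ (stock_list : List (List (String × String))), Dom_merge_concept_stocks stock_list → Pre_merge_concept_stocks stock_list → Spec_merge_concept_stocks stock_list (merge_concept_stocks stock_list)

-- ===== LEMMAS AND PROOFS =====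

-- The value relation between A's accumulator entries and B's group entries.
def mcsF (p : String × List (PySem.Dict String String)) : String × PySem.Dict String String :=
  (p.1, mcsReduce p.2)

theorem get?_mk_mapF (l : List (String × List (PySem.Dict String String))) (k : String) :
    (PySem.Dict.mk (l.map mcsF)).get? k = ((PySem.Dict.mk l).get? k).map mcsReduce := by
  induction l with
  | nil => rfl
  | cons p rest ih =>
      obtain ⟨a, v⟩ := p
      simp only [List.map_cons, mcsF, PySem.Dict.get?_mk_cons]
      split_ifs with h
      · rfl
      · exact ih

theorem red_append (grp : List (PySem.Dict String String)) (st : PySem.Dict String String)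
    (h : grp ≠ []) : mcsReduce (grp ++ [st]) = mcsNameStep (mcsReduce grp) st := by
  cases grp with
  | nil => exact absurd rfl h
  | cons b rest => simp [mcsReduce, List.foldl_append]

theorem key_unique {ν : Type} {l : List (String × ν)} (h : (l.map Prod.fst).Nodup)
    {p q : String × ν} (hp : p ∈ l) (hq : q ∈ l) (hk : p.1 = q.1) : p = q := by
  exact List.inj_on_of_nodup_map h hp hq hk

theorem step_inv (g : PySem.Dict String (List (PySem.Dict String String)))
    (stock : List (String × String))
    (h2 : g.keys.Nodup)
    (h3 : ∀ p ∈ g.items, p.2 ≠ []) :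
    (mcsStepA (PySem.Dict.mk (g.items.map mcsF)) stock).items = (mcsGroupStep g stock).items.map mcsF
    ∧ (mcsGroupStep g stock).keys.Nodup
    ∧ ∀ p ∈ (mcsGroupStep g stock).items, p.2 ≠ [] := by
  have h2' : (g.items.map Prod.fst).Nodup := h2
  cases hg : g.get? ((PySem.Dict.mk stock).getD "ts_code" "") with
  | none =>
    have hmg : (PySem.Dict.mk (g.items.map mcsF)).get? ((PySem.Dict.mk stock).getD "ts_code" "") = none := by
      rw [get?_mk_mapF]
      change (g.get? _).map mcsReduce = none
      rw [hg]; rfl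
    have hcontB : g.contains ((PySem.Dict.mk stock).getD "ts_code" "") = false := by
      rw [PySem.Dict.contains_eq_isSome_get?, hg]; rfl
    have hcontA : (PySem.Dict.mk (g.items.map mcsF)).contains ((PySem.Dict.mk stock).getD "ts_code" "") = false := by
      rw [PySem.Dict.contains_eq_isSome_get?, hmg]; rfl
    have hgD : g.getD ((PySem.Dict.mk stock).getD "ts_code" "") [] = [] := by
      rw [PySem.Dict.getD_eq_get?_getD, hg]; rfl
    have hb : mcsGroupStep g stock
        = g.insert ((PySem.Dict.mk stock).getD "ts_code" "") [PySem.Dict.mk stock] := by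
      simp only [mcsGroupStep, PySem.Dict.modify, hgD, List.nil_append]
    have ha : mcsStepA (PySem.Dict.mk (g.items.map mcsF)) stock
        = (PySem.Dict.mk (g.items.map mcsF)).insert ((PySem.Dict.mk stock).getD "ts_code" "")
            (PySem.Dict.mk stock) := by
      simp only [mcsStepA, hmg]
    have hnotmem : ((PySem.Dict.mk stock).getD "ts_code" "") ∉ g.keys := by
      intro hmem
      rw [← PySem.Dict.contains_iff_mem_keys] at hmem
      simp [hcontB] at hmem
    refine ⟨?_, ?_, ?_⟩
    · rw [ha, hb, PySem.Dict.items_insert_of_not_contains _ _ hcontA,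
        PySem.Dict.items_insert_of_not_contains _ _ hcontB, List.map_append]
      rfl
    · rw [hb, PySem.Dict.keys_insert_of_not_contains _ _ hcontB]
      simp [List.nodup_append, h2]
      exact fun a ha hEq => hnotmem (hEq ▸ ha)
    · intro p hp
      rw [hb, PySem.Dict.items_insert_of_not_contains _ _ hcontB] at hp
      rcases List.mem_append.mp hp with h | h
      · exact h3 p h
      · simp only [List.mem_singleton] at h
        subst h
        simp
  | some grp =>
    have hmem : ((PySem.Dict.mk stock).getD "ts_code" "", grp) ∈ g.items :=
      PySem.Dict.mem_items_of_get?_eq_some _ hg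
    have hne : grp ≠ [] := h3 _ hmem
    have hmg : (PySem.Dict.mk (g.items.map mcsF)).get? ((PySem.Dict.mk stock).getD "ts_code" "")
        = some (mcsReduce grp) := by
      rw [get?_mk_mapF]
      change (g.get? _).map mcsReduce = _
      rw [hg]; rfl
    have hcontB : g.contains ((PySem.Dict.mk stock).getD "ts_code" "") = true := by
      rw [PySem.Dict.contains_eq_isSome_get?, hg]; rfl
    have hcontA : (PySem.Dict.mk (g.items.map mcsF)).contains ((PySem.Dict.mk stock).getD "ts_code" "") = true := by
      rw [PySem.Dict.contains_eq_isSome_get?, hmg]; rfl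
    have hgD : g.getD ((PySem.Dict.mk stock).getD "ts_code" "") [] = grp := by
      rw [PySem.Dict.getD_eq_get?_getD, hg]; rfl
    have hb : mcsGroupStep g stock
        = g.insert ((PySem.Dict.mk stock).getD "ts_code" "") (grp ++ [PySem.Dict.mk stock]) := by
      simp only [mcsGroupStep, PySem.Dict.modify, hgD]
    have huniq : ∀ p ∈ g.items, p.1 = ((PySem.Dict.mk stock).getD "ts_code" "")
        → p = (((PySem.Dict.mk stock).getD "ts_code" ""), grp) :=
      fun p hp hk => key_unique h2' hp hmem hk
    have ha : mcsStepA (PySem.Dict.mk (g.items.map mcsF)) stock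
        = if PySem.Str.isIn ((PySem.Dict.mk stock).getD "name" "") ((mcsReduce grp).getD "name" "")
          then PySem.Dict.mk (g.items.map mcsF)
          else (PySem.Dict.mk (g.items.map mcsF)).insert ((PySem.Dict.mk stock).getD "ts_code" "")
            ((mcsReduce grp).insert "name"
              ((mcsReduce grp).getD "name" "" ++ "," ++ (PySem.Dict.mk stock).getD "name" "")) := by
      simp only [mcsStepA, hmg]
    refine ⟨?_, ?_, ?_⟩
    · rw [ha, hb, PySem.Dict.items_insert_of_contains _ _ hcontB, List.map_map]
      by_cases hin : PySem.Str.isIn ((PySem.Dict.mk stock).getD "name" "") ((mcsReduce grp).getD "name" "") = true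
      · rw [if_pos hin]
        change List.map mcsF g.items = _
        apply List.map_congr_left
        intro p hp
        by_cases hpk : (p.1 == ((PySem.Dict.mk stock).getD "ts_code" "")) = true
        · have hp' := huniq p hp (eq_of_beq hpk)
          rw [hp']
          simp only [Function.comp_apply, beq_self_eq_true, if_true]
          rw [show mcsF ((PySem.Dict.mk stock).getD "ts_code" "", grp ++ [PySem.Dict.mk stock])
              = (((PySem.Dict.mk stock).getD "ts_code" ""), mcsReduce (grp ++ [PySem.Dict.mk stock])) from rfl,
            red_append _ _ hne]
          rw [show mcsF ((PySem.Dict.mk stock).getD "ts_code" "", grp)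
              = (((PySem.Dict.mk stock).getD "ts_code" ""), mcsReduce grp) from rfl]
          simp only [mcsNameStep]
          rw [if_pos hin]
        · simp [Function.comp, hpk]
      · rw [if_neg hin]
        rw [PySem.Dict.items_insert_of_contains _ _ hcontA, List.map_map]
        apply List.map_congr_left
        intro p hp
        have hin' : PySem.Str.isIn ((PySem.Dict.mk stock).getD "name" "") ((mcsReduce grp).getD "name" "") = false :=
          Bool.eq_false_iff.mpr hin
        by_cases hpk : (p.1 == ((PySem.Dict.mk stock).getD "ts_code" "")) = true
        · have hp' := huniq p hp (eq_of_beq hpk)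
          rw [hp']
          simp only [Function.comp_apply]
          rw [show mcsF ((PySem.Dict.mk stock).getD "ts_code" "", grp) =
              (((PySem.Dict.mk stock).getD "ts_code" ""), mcsReduce grp) from rfl]
          simp only [beq_self_eq_true, if_true]
          have hcond : ¬ (PySem.Str.isIn ((PySem.Dict.mk stock).getD "name" "")
              ((mcsReduce grp).getD "name" "") = true) := by
            rw [hin']; exact Bool.false_ne_true
          rw [show mcsF (((PySem.Dict.mk stock).getD "ts_code" ""), grp ++ [PySem.Dict.mk stock])
              = (((PySem.Dict.mk stock).getD "ts_code" ""), mcsReduce (grp ++ [PySem.Dict.mk stock])) from rfl,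
            red_append _ _ hne]
          simp only [mcsNameStep]
          rw [if_neg hcond]
        · simp [Function.comp, hpk, mcsF]
    · rw [hb, PySem.Dict.keys_insert_of_contains _ _ hcontB]
      exact h2
    · intro p hp
      rw [hb, PySem.Dict.items_insert_of_contains _ _ hcontB] at hp
      obtain ⟨q, hq, rfl⟩ := List.mem_map.mp hp
      by_cases hqk : (q.1 == ((PySem.Dict.mk stock).getD "ts_code" "")) = true
      · simp [hqk]
      · simp only [hqk]
        simpa using h3 q hq

theorem fold_inv (sl : List (List (String × String)))
    (g : PySem.Dict String (List (PySem.Dict String String)))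
    (h2 : g.keys.Nodup)
    (h3 : ∀ p ∈ g.items, p.2 ≠ []) :
    (sl.foldl mcsStepA (PySem.Dict.mk (g.items.map mcsF))).items
      = (sl.foldl mcsGroupStep g).items.map mcsF := by
  induction sl generalizing g with
  | nil => rfl
  | cons stock rest ih =>
      obtain ⟨e1, e2, e3⟩ := step_inv g stock h2 h3
      have hm : mcsStepA (PySem.Dict.mk (g.items.map mcsF)) stock
          = PySem.Dict.mk ((mcsGroupStep g stock).items.map mcsF) := PySem.Dict.ext e1
      simp only [List.foldl_cons, hm]
      exact ih (mcsGroupStep g stock) e2 e3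

-- ===== VERDICT (by name: the statement is the Claim_ definition above) =====
theorem merge_concept_stocks_spec : Claim_equal_merge_concept_stocks := by
  intro sl _ _
  unfold Spec_merge_concept_stocks merge_concept_stocks merge_concept_stocks_alt
  have h := fold_inv sl (PySem.Dict.mk []) (by simp [PySem.Dict.keys]) (by simp)
  simp only [List.map_nil] at h
  rw [PySem.Dict.values, PySem.Dict.values, h]
  simp only [List.map_map]
  exact List.map_congr_left (fun p _ => rfl)
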